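-- pv_equiv track=rewrite | github.com/Bruhtek/agh-wdi | zestawy/02 - tablice 1D/z95.py | friendly_neighbors
-- ===== SOURCE A (Python) =====
-- def sito(n)->list[int]:
--     pierwsze = [1 for _ in range(n+1)]
--     pierwsze[0] = 0
--     pierwsze[1] = 0
--     i = 2
--     while i*i <= n:
--         if(pierwsze[i] == 0):
--             i += 2
--             continue
--         for j in range(i*i, n+1, i):
--             pierwsze[j] = 0
--         if i == 2:
--             i += 1
--         else:
--             i += 2
--
--     pierwsze_count = 0
--     for i in range(len(pierwsze)):
--         if pierwsze[i] == 1: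
--             pierwsze_count += 1
--     liczby = [0 for _ in range(pierwsze_count)]
--     iter = 0
--     for i in range(len(pierwsze)):
--         if pierwsze[i] == 1:
--             liczby[iter] = i
--             iter += 1
--     return liczby
--
-- def zgodne(a, b, pierwsze)->bool:
--     bigger = max(a, b)
--     for pierwsza in pierwsze:
--         if pierwsza > bigger:
--             return True
--         if a % pierwsza == 0 and b % pierwsza != 0:
--             return False
--         if b % pierwsza == 0 and a % pierwsza != 0:
--             return False
--     return True
--
-- def friendly_neighbors(tab)->int:
--     pierwsze = sito(999)
--     count = 0
--     n = len(tab)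
--     for i in range(0, n):
--         has_zgoda = False
--         neighbor_start = max(0, i-2)
--         neighbor_end = min(i+2,n-1) + 1
--         for j in range(neighbor_start, neighbor_end):
--             if i == j: continue
--             if zgodne(tab[i], tab[j], pierwsze):
--                 has_zgoda = True
--                 break
--         if has_zgoda:
--             count += 1
--     return count
-- ===== SOURCE B (Python) =====
-- def sito(n)->list[int]:
--     pierwsze = [1 for _ in range(n+1)]
--     pierwsze[0] = 0
--     pierwsze[1] = 0
--     i = 2
--     while i*i <= n:
--         if(pierwsze[i] == 0):
--             i += 2
--             continue
--         for j in range(i*i, n+1, i):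
--             pierwsze[j] = 0
--         if i == 2:
--             i += 1
--         else:
--             i += 2
--
--     pierwsze_count = 0
--     for i in range(len(pierwsze)):
--         if pierwsze[i] == 1:
--             pierwsze_count += 1
--     liczby = [0 for _ in range(pierwsze_count)]
--     iter = 0
--     for i in range(len(pierwsze)):
--         if pierwsze[i] == 1:
--             liczby[iter] = i
--             iter += 1
--     return liczby
--
-- def friendly_neighbors(tab) -> int:
--     primes = sito(999)
--     # precompute each element's prime signature: the primes (< 1000) dividing it
--     sigs = [[p for p in primes if x % p == 0] for x in tab]
--
--     def compat(i, j):
--         # compatible iff every prime in the symmetric difference of the two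
--         # signatures exceeds both values
--         m = max(tab[i], tab[j])
--         si, sj = sigs[i], sigs[j]
--         return (all(p > m for p in si if p not in sj)
--                 and all(p > m for p in sj if p not in si))
--
--     n = len(tab)
--     return sum(1 for i in range(n)
--                if any(compat(i, j)
--                       for j in range(max(0, i - 2), min(i + 2, n - 1) + 1)
--                       if j != i))
-- ===== Notes on version B (the rewrite author's own statement) =====
-- stated objective: alternative
-- what changed: B precomputes each element's prime signature (the primes below 1000 dividing it) once and decides neighbor compatibility by checking that every prime in the set difference of two signatures exceeds both values, replacing A's per-pair short-circuiting scan over the whole prime list; the counting becomes a sum-of-any comprehension instead of nested break loops.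
import Mathlib
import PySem

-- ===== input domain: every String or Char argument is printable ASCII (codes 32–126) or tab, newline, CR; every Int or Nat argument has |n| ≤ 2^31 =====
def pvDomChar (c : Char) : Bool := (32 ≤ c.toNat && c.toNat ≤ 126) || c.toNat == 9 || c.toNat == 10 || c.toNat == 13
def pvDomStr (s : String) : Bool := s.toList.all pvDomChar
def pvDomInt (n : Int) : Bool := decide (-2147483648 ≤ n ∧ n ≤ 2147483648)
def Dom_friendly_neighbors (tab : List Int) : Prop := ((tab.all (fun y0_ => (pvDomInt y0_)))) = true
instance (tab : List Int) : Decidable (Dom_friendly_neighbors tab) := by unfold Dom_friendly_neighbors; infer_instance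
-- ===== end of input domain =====

-- B keeps the module's sieve helper but replaces the per-pair prime scan of `zgodne` by
-- precomputed per-element prime signatures compared via a thresholded set difference
-- (objective: alternative decomposition; same return value).

-- ===== PORT A =====
-- the while-loop of sito; the Nat fuel only bounds the iteration count
-- (the loop exits by its own `i*i <= n` test first, exactly as in Python)
def sitoLoop : Nat → Int → List Int → Int → List Int
  | 0, _, pierwsze, _ => pierwsze
  | fuel + 1, n, pierwsze, i =>
    if i * i ≤ n then
      if PySem.List.pyGetD pierwsze i 0 == 0 then
        sitoLoop fuel n pierwsze (i + 2)
      else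
        let p2 := (PySem.List.pyRange (i * i) (n + 1) i).foldl
          (fun l j => l.set j.toNat 0) pierwsze
        if i == 2 then sitoLoop fuel n p2 (i + 1) else sitoLoop fuel n p2 (i + 2)
    else pierwsze

-- `pierwsze` after the sieve loop
def sitoTable (n : Int) : List Int :=
  sitoLoop (n + 2).toNat n (((List.replicate (n + 1).toNat (1 : Int)).set 0 0).set 1 0) 2

-- the `pierwsze_count` loop
def sitoCount (p : List Int) : Int :=
  (PySem.List.pyRange 0 (p.length : Int)).foldl
    (fun c i => if PySem.List.pyGetD p i 0 == 1 then c + 1 else c) 0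

-- the `liczby` fill loop
def sitoFill (p : List Int) (cnt : Int) : List Int :=
  ((PySem.List.pyRange 0 (p.length : Int)).foldl
    (fun (st : List Int × Int) i =>
      if PySem.List.pyGetD p i 0 == 1 then (st.1.set st.2.toNat i, st.2 + 1) else st)
    (List.replicate cnt.toNat (0 : Int), 0)).1

def sito (n : Int) : List Int :=
  sitoFill (sitoTable n) (sitoCount (sitoTable n))

def zgodneGo (bigger a b : Int) : List Int → Bool
  | [] => true
  | p :: rest =>
    if bigger < p then true
    else if PySem.Int.mod a p == 0 && PySem.Int.mod b p != 0 then false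
    else if PySem.Int.mod b p == 0 && PySem.Int.mod a p != 0 then false
    else zgodneGo bigger a b rest

def zgodne (a b : Int) (pierwsze : List Int) : Bool :=
  zgodneGo (max a b) a b pierwsze

def fnInner (tab pierwsze : List Int) (i : Int) : List Int → Bool
  | [] => false
  | j :: rest =>
    if j == i then fnInner tab pierwsze i rest
    else if zgodne (PySem.List.pyGetD tab i 0) (PySem.List.pyGetD tab j 0) pierwsze then true
    else fnInner tab pierwsze i rest

def friendly_neighbors (tab : List Int) : Int :=
  let pierwsze := sito 999
  let n : Int := (tab.length : Int)
  (PySem.List.pyRange 0 n).foldl (fun count i =>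
    if fnInner tab pierwsze i
        (PySem.List.pyRange (max 0 (i - 2)) (min (i + 2) (n - 1) + 1))
      then count + 1 else count) 0

-- ===== PORT B =====
-- (Source B reuses the module's `sito` helper verbatim; its port is shared above)
def sigOf (primes : List Int) (x : Int) : List Int :=
  primes.filter (fun p => PySem.Int.mod x p == 0)

def compatB (tab : List Int) (sigs : List (List Int)) (i j : Int) : Bool :=
  let m := max (PySem.List.pyGetD tab i 0) (PySem.List.pyGetD tab j 0)
  let si := PySem.List.pyGetD sigs i []
  let sj := PySem.List.pyGetD sigs j []
  (si.filter (fun p => !sj.contains p)).all (fun p => decide (m < p)) &&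
  (sj.filter (fun p => !si.contains p)).all (fun p => decide (m < p))

def friendly_neighbors_alt (tab : List Int) : Int :=
  let primes := sito 999
  let sigs := tab.map (sigOf primes)
  let n : Int := (tab.length : Int)
  ((PySem.List.pyRange 0 n).countP (fun i =>
    (PySem.List.pyRange (max 0 (i - 2)) (min (i + 2) (n - 1) + 1)).any
      (fun j => j != i && compatB tab sigs i j)) : Nat)

-- ===== PRECONDITION & SPEC =====
def Spec_friendly_neighbors (tab : List Int) (out : Int) : Prop := out = friendly_neighbors_alt tab
instance (tab : List Int) (out : Int) : Decidable (Spec_friendly_neighbors tab out) := by unfold Spec_friendly_neighbors; infer_instance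

-- ===== CLAIM (what is proved, stated in full; the proofs are below) =====
def Claim_equal_friendly_neighbors : Prop := ∀ (tab : List Int), Dom_friendly_neighbors tab → Spec_friendly_neighbors tab (friendly_neighbors tab)

-- ===== LEMMAS AND PROOFS =====

-- the fill loop writes the hit indices, in order, into the zero-padded buffer
theorem fillGo (hit : Int → Bool) (R : List Int) (pre : List Int) :
    (R.foldl (fun (st : List Int × Int) i =>
        if hit i then (st.1.set st.2.toNat i, st.2 + 1) else st)
      (pre ++ List.replicate (R.countP hit) (0 : Int), (pre.length : Int))).1
    = pre ++ R.filter hit := by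
  induction R generalizing pre with
  | nil => simp
  | cons r R ih =>
    by_cases hr : hit r
    · have hc : (r :: R).countP hit = R.countP hit + 1 := by
        simp [hr]
      have hset : (pre ++ List.replicate (R.countP hit + 1) (0 : Int)).set
          ((pre.length : Int)).toNat r
          = (pre ++ [r]) ++ List.replicate (R.countP hit) (0 : Int) := by
        rw [Int.toNat_natCast, List.set_append]
        simp [List.replicate_succ]
      have hlen : ((pre.length : Int)) + 1 = (((pre ++ [r]).length : Nat) : Int) := by
        simp
      simp only [List.foldl_cons, hc, hr, if_pos, hset, hlen]
      rw [ih (pre ++ [r])]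
      simp [hr]
    · have hc : (r :: R).countP hit = R.countP hit := by
        simp [hr]
      simp only [List.foldl_cons, hc, hr, if_false, Bool.false_eq_true]
      rw [ih pre]
      simp [hr]

theorem sito_sorted (n : Int) : (sito n).Pairwise (· < ·) := by
  unfold sito sitoFill
  have hcount : sitoCount (sitoTable n) =
      (((PySem.List.pyRange 0 ((sitoTable n).length : Int)).countP
        (fun i => PySem.List.pyGetD (sitoTable n) i 0 == 1) : Nat) : Int) := by
    unfold sitoCount
    rw [PySem.List.foldl_count_if (fun i => PySem.List.pyGetD (sitoTable n) i 0 == 1)]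
    simp
  rw [hcount, Int.toNat_natCast]
  have hfill := fillGo (fun i => PySem.List.pyGetD (sitoTable n) i 0 == 1)
    (PySem.List.pyRange 0 ((sitoTable n).length : Int)) []
  simp only [List.nil_append, List.length_nil, Nat.cast_zero] at hfill
  rw [hfill]
  have hpr : (PySem.List.pyRange 0 ((sitoTable n).length : Int)).Pairwise (· < ·) := by
    rw [PySem.List.pyRange_zero_natCast]
    exact List.Pairwise.map _ (fun a b h => by exact_mod_cast h) List.pairwise_lt_range
  exact hpr.filter _

-- characterization of A's compatibility loop on a sorted prime list
theorem zgodneGo_iff (m a b : Int) (l : List Int) (hs : l.Pairwise (· < ·)) :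
    (zgodneGo m a b l = true ↔
      ∀ p ∈ l, m < p ∨ (PySem.Int.mod a p = 0 ↔ PySem.Int.mod b p = 0)) := by
  induction l with
  | nil => simp [zgodneGo]
  | cons q rest ih =>
    obtain ⟨hq, hrest⟩ := List.pairwise_cons.mp hs
    simp only [zgodneGo]
    by_cases hlt : m < q
    · simp only [if_pos hlt]
      constructor
      · intro _ p hp
        rcases List.mem_cons.mp hp with rfl | hp
        · exact Or.inl hlt
        · exact Or.inl (hlt.trans (hq p hp))
      · intro _; trivial
    · rw [if_neg hlt]
      by_cases hab : (PySem.Int.mod a q == 0 && PySem.Int.mod b q != 0) = true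
      · rw [if_pos hab]
        simp only [Bool.and_eq_true, beq_iff_eq, bne_iff_ne, ne_eq] at hab
        simp only [Bool.false_eq_true, false_iff]
        intro h
        rcases h q (List.mem_cons_self) with h1 | h2
        · exact hlt h1
        · exact hab.2 (h2.mp hab.1)
      · rw [if_neg hab]
        by_cases hba : (PySem.Int.mod b q == 0 && PySem.Int.mod a q != 0) = true
        · rw [if_pos hba]
          simp only [Bool.and_eq_true, beq_iff_eq, bne_iff_ne, ne_eq] at hba
          simp only [Bool.false_eq_true, false_iff]
          intro h
          rcases h q (List.mem_cons_self) with h1 | h2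
          · exact hlt h1
          · exact hba.2 (h2.mpr hba.1)
        · rw [if_neg hba]
          simp only [Bool.and_eq_true, beq_iff_eq, bne_iff_ne, ne_eq, not_and, not_not] at hab hba
          have hiff : PySem.Int.mod a q = 0 ↔ PySem.Int.mod b q = 0 := ⟨hab, hba⟩
          rw [ih hrest]
          simp only [List.forall_mem_cons]
          constructor
          · intro h; exact ⟨Or.inr hiff, h⟩
          · intro h; exact h.2

theorem allfilter_iff (s t : List Int) (m : Int) :
    ((s.filter (fun p => !t.contains p)).all (fun p => decide (m < p)) = true) ↔
      ∀ p ∈ s, p ∉ t → m < p := by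
  simp only [List.all_eq_true, List.mem_filter, Bool.not_eq_eq_eq_not,
    Bool.not_true, decide_eq_true_eq, and_imp, List.contains_eq_mem, decide_eq_false_iff_not]

-- the key per-pair fact: A's prime scan equals B's signature comparison
theorem key (a b : Int) (P : List Int) (hs : P.Pairwise (· < ·)) :
    zgodne a b P =
      (((sigOf P a).filter (fun p => !(sigOf P b).contains p)).all
          (fun p => decide (max a b < p)) &&
        ((sigOf P b).filter (fun p => !(sigOf P a).contains p)).all
          (fun p => decide (max a b < p))) := by
  apply Bool.coe_iff_coe.mp
  rw [Bool.and_eq_true, allfilter_iff, allfilter_iff, zgodne, zgodneGo_iff _ _ _ _ hs]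
  have hmem : ∀ (x p : Int), p ∈ sigOf P x ↔ p ∈ P ∧ PySem.Int.mod x p = 0 := by
    intro x p; simp [sigOf, List.mem_filter]
  constructor
  · intro h
    constructor
    · intro p hp hnp
      obtain ⟨hpP, hpa⟩ := (hmem a p).mp hp
      have hpb : ¬ PySem.Int.mod b p = 0 := fun hb => hnp ((hmem b p).mpr ⟨hpP, hb⟩)
      rcases h p hpP with h1 | h2
      · exact h1
      · exact absurd (h2.mp hpa) hpb
    · intro p hp hnp
      obtain ⟨hpP, hpb⟩ := (hmem b p).mp hp
      have hpa : ¬ PySem.Int.mod a p = 0 := fun ha => hnp ((hmem a p).mpr ⟨hpP, ha⟩)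
      rcases h p hpP with h1 | h2
      · exact h1
      · exact absurd (h2.mpr hpb) hpa
  · rintro ⟨h1, h2⟩ p hp
    by_cases ha : PySem.Int.mod a p = 0 <;> by_cases hb : PySem.Int.mod b p = 0
    · exact Or.inr (by simp [ha, hb])
    · exact Or.inl (h1 p ((hmem a p).mpr ⟨hp, ha⟩) (fun hm => hb ((hmem b p).mp hm).2))
    · exact Or.inl (h2 p ((hmem b p).mpr ⟨hp, hb⟩) (fun hm => ha ((hmem a p).mp hm).2))
    · exact Or.inr (by simp [ha, hb])

theorem fnInner_eq_any (tab P : List Int) (i : Int) (js : List Int) :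
    fnInner tab P i js = js.any (fun j =>
      j != i && zgodne (PySem.List.pyGetD tab i 0) (PySem.List.pyGetD tab j 0) P) := by
  induction js with
  | nil => simp [fnInner]
  | cons j rest ih =>
    simp only [fnInner, List.any_cons]
    by_cases h1 : (j == i) = true
    · simp [h1, ih, bne]
    · by_cases h2 : zgodne (PySem.List.pyGetD tab i 0) (PySem.List.pyGetD tab j 0) P = true
      · simp [h1, h2, bne]
      · simp [h1, h2, ih, bne]

theorem anyCongrMem (l : List Int) (p q : Int → Bool) (h : ∀ x ∈ l, p x = q x) :
    l.any p = l.any q := by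
  induction l with
  | nil => rfl
  | cons x xs ih =>
    simp only [List.any_cons, h x (by simp)]
    rw [ih (fun y hy => h y (by simp [hy]))]

-- ===== VERDICT (by name: the statement is the Claim_ definition above) =====
theorem pyGetD_map_sig (tab : List Int) (k : Int) (h0 : 0 ≤ k) (h1 : k < (tab.length : Int)) :
    PySem.List.pyGetD (tab.map (sigOf (sito 999))) k [] =
      sigOf (sito 999) (PySem.List.pyGetD tab k 0) := by
  rw [PySem.List.pyGetD_eq_getElem _ _ h0 (by simpa using h1),
    PySem.List.pyGetD_eq_getElem _ _ h0 h1]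
  simp

theorem friendly_neighbors_spec : Claim_equal_friendly_neighbors := by
  intro tab _
  unfold Spec_friendly_neighbors
  simp only [friendly_neighbors, friendly_neighbors_alt]
  rw [PySem.List.foldl_count_if (fun i => fnInner tab (sito 999) i
    (PySem.List.pyRange (max 0 (i - 2)) (min (i + 2) ((tab.length : Int) - 1) + 1))), zero_add]
  apply congrArg
  apply List.countP_congr
  intro i hi
  obtain ⟨hi0, hin⟩ := PySem.List.mem_pyRange_one.mp hi
  rw [fnInner_eq_any]
  have hany :
      (PySem.List.pyRange (max 0 (i - 2)) (min (i + 2) ((tab.length : Int) - 1) + 1)).any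
        (fun j => j != i && zgodne (PySem.List.pyGetD tab i 0) (PySem.List.pyGetD tab j 0) (sito 999)) =
      (PySem.List.pyRange (max 0 (i - 2)) (min (i + 2) ((tab.length : Int) - 1) + 1)).any
        (fun j => j != i && compatB tab (tab.map (sigOf (sito 999))) i j) := by
    apply anyCongrMem
    intro j hj
    obtain ⟨hj0, hjn⟩ := PySem.List.mem_pyRange_one.mp hj
    have hj0' : 0 ≤ j := le_trans (le_max_left 0 (i - 2)) hj0
    have hjn' : j < (tab.length : Int) := by omega
    apply congrArg
    simp only [compatB]
    rw [pyGetD_map_sig tab i hi0 hin, pyGetD_map_sig tab j hj0' hjn']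
    exact key _ _ _ (sito_sorted 999)
  rw [hany]
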